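-- pv_equiv track=rewrite | github.com/StBogdan/CTCI_python | chapter_17/p17_8.py | get_circus_tower
-- ===== SOURCE A (Python) =====
-- from typing import List, Tuple
--
-- def can_add(bot: tuple, top: tuple) -> bool:
--     return bot[0] > top[0] and bot[1] > top[1]
--
-- def get_circus_tower(arr: List[tuple]) -> List[tuple]:
--     seqs = []  # Start poz -> list of heights
--     sorted_arr = sorted(arr, reverse=True)
--
--     # For every performer
--     # (and every seq from prev performers,
--     #  see if you can add them)
--     for i in range(len(arr)):
--         for good_seq in filter(lambda seq: can_add(seq[-1], sorted_arr[i]), seqs):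
--             good_seq.append(sorted_arr[i])
--
--         # for j in range(len(seqs)):
--         #     if can_add(seqs[j][-1], sorted_arr[i]):
--         #         seqs[j].append(sorted_arr[i])
--         seqs.append([sorted_arr[i]])
--     return max(seqs, key=len)
-- ===== SOURCE B (Python) =====
-- def can_add(bot: tuple, top: tuple) -> bool:
--     return bot[0] > top[0] and bot[1] > top[1]
--
-- def get_circus_tower(arr):
--     sorted_arr = sorted(arr, reverse=True)
--     chains = []
--     for j in range(len(sorted_arr)):
--         tail = sorted_arr[j]
--         chain = [tail]
--         for item in sorted_arr[j + 1:]: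
--             if can_add(tail, item):
--                 chain.append(item)
--                 tail = item
--         chains.append(chain)
--     return max(chains, key=len)
-- ===== Notes on version B (the rewrite author's own statement) =====
-- stated objective: alternative
-- what changed: Instead of growing all partial chains in lockstep element-by-element (a live list of chains, each extended via its last element), B builds each chain to completion independently: for every start index it makes one greedy scan of the remaining sorted suffix with a single running tail, then takes the first longest chain.
-- outside the precondition, e.g. on get_circus_tower([]): A raises ValueError, B raises ValueError
import Mathlib
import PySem

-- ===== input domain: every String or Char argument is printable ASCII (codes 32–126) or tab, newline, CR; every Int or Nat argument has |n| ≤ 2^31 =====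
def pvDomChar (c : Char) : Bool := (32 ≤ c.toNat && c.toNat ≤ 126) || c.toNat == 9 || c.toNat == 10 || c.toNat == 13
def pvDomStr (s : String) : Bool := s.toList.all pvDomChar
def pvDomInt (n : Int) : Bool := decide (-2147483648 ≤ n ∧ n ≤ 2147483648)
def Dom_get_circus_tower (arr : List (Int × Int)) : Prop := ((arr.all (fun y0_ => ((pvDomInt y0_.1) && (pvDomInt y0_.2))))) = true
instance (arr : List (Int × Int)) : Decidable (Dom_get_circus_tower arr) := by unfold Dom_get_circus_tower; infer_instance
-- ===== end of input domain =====

-- B builds each greedy chain in one pass with a single running tail per start index,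
-- instead of A's lockstep growth of all partial chains at every element (objective: alternative).

-- ===== PORT A =====
-- can_add(bot, top)
def canAdd (bot top : Int × Int) : Bool := decide (bot.1 > top.1) && decide (bot.2 > top.2)

-- one iteration of A's outer loop: append x to every chain whose last element admits it,
-- then start the new one-element chain [x].  seq[-1] is seq.getLast? (chains are never empty).
def stepA (seqs : List (List (Int × Int))) (x : Int × Int) : List (List (Int × Int)) :=
  seqs.map (fun seq => if canAdd (seq.getLast?.getD (0, 0)) x then seq ++ [x] else seq) ++ [[x]]

def get_circus_tower (arr : List (Int × Int)) : List (Int × Int) :=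
  -- sorted(arr, reverse=True): tuples compare lexicographically.
  -- for i in range(len(arr)) uses only sorted_arr[i]; len(arr) = len(sorted_arr), so the
  -- index loop is exactly a traversal of sorted_arr.
  -- max(seqs, key=len): first chain of maximal length; raises on [] (excluded by Pre_)
  (PySem.List.max? ((PySem.List.sorted2 arr Prod.fst Prod.snd true).foldl stepA [])
    (fun s => (s.length : Int))).getD []

-- ===== PORT B =====
-- inner loop of B: scan rest once keeping the running tail; append when can_add(tail, item)
def greedyB (tail : Int × Int) (rest : List (Int × Int)) (chain : List (Int × Int)) :
    List (Int × Int) :=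
  match rest with
  | [] => chain
  | x :: rs => if canAdd tail x then greedyB x rs (chain ++ [x]) else greedyB tail rs chain

-- outer loop of B: one finished chain per start index j (chain j scans sorted_arr[j+1:])
def chainsB : List (Int × Int) → List (List (Int × Int))
  | [] => []
  | x :: rs => greedyB x rs [x] :: chainsB rs

def get_circus_tower_alt (arr : List (Int × Int)) : List (Int × Int) :=
  (PySem.List.max? (chainsB (PySem.List.sorted2 arr Prod.fst Prod.snd true))
    (fun s => (s.length : Int))).getD []

-- ===== PRECONDITION & SPEC =====
-- Pre_ excludes only the empty list, on which both Pythons raise ValueError from max([]).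
def Pre_get_circus_tower (arr : List (Int × Int)) : Prop := arr ≠ []
instance (arr : List (Int × Int)) : Decidable (Pre_get_circus_tower arr) := by
  unfold Pre_get_circus_tower; infer_instance

def pvWitness_get_circus_tower : (List (Int × Int)) := [(65, 100), (70, 150), (56, 90)]

def Spec_get_circus_tower (arr : List (Int × Int)) (out : List (Int × Int)) : Prop :=
  out = get_circus_tower_alt arr
instance (arr : List (Int × Int)) (out : List (Int × Int)) : Decidable (Spec_get_circus_tower arr out) := by
  unfold Spec_get_circus_tower; infer_instance

-- ===== CLAIM (what is proved, stated in full; the proofs are below) =====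
def Claim_equal_get_circus_tower : Prop := ∀ (arr : List (Int × Int)), Dom_get_circus_tower arr → Pre_get_circus_tower arr → Spec_get_circus_tower arr (get_circus_tower arr)

-- ===== LEMMAS AND PROOFS =====

-- the per-chain growth step A applies to one chain at element x
def growOne (seq : List (Int × Int)) (x : Int × Int) : List (Int × Int) :=
  if canAdd (seq.getLast?.getD (0, 0)) x then seq ++ [x] else seq

-- B's single-tail greedy scan computes exactly A's per-chain growth, provided the running
-- tail is the last element of the accumulated chain.
lemma greedyB_eq_foldl (rest : List (Int × Int)) :
    ∀ (tail : Int × Int) (chain : List (Int × Int)),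
      greedyB tail rest (chain ++ [tail]) = rest.foldl growOne (chain ++ [tail]) := by
  induction rest with
  | nil => intro tail chain; rfl
  | cons x rs ih =>
    intro tail chain
    have hlast : (chain ++ [tail]).getLast?.getD (0, 0) = tail := by simp
    by_cases h : canAdd tail x = true
    · show (if canAdd tail x = true then _ else _) = List.foldl growOne _ (x :: rs)
      rw [if_pos h, List.foldl_cons]
      show _ = List.foldl growOne (growOne (chain ++ [tail]) x) rs
      unfold growOne
      rw [hlast, if_pos h]
      exact ih x (chain ++ [tail])
    · show (if canAdd tail x = true then _ else _) = List.foldl growOne _ (x :: rs)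
      rw [if_neg h, List.foldl_cons]
      show _ = List.foldl growOne (growOne (chain ++ [tail]) x) rs
      unfold growOne
      rw [hlast, if_neg h]
      exact ih tail chain

-- A's lockstep fold over all chains = grow every already-started chain to the end,
-- and the chains started later are exactly B's chains of the remaining suffix.
lemma foldl_stepA_eq (s : List (Int × Int)) :
    ∀ (seqs : List (List (Int × Int))),
      s.foldl stepA seqs = seqs.map (fun q => s.foldl growOne q) ++ chainsB s := by
  induction s with
  | nil => intro seqs; simp [chainsB]
  | cons x rs ih =>
    intro seqs
    have hstep : stepA seqs x = seqs.map (fun q => growOne q x) ++ [[x]] := rfl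
    calc (x :: rs).foldl stepA seqs
        = rs.foldl stepA (seqs.map (fun q => growOne q x) ++ [[x]]) := by
          simp [List.foldl_cons, hstep]
      _ = (seqs.map (fun q => growOne q x) ++ [[x]]).map (fun q => rs.foldl growOne q)
            ++ chainsB rs := ih _
      _ = seqs.map (fun q => (x :: rs).foldl growOne q) ++ chainsB (x :: rs) := by
          simp only [List.map_append, List.map_map, List.map_cons, List.map_nil, chainsB,
            List.append_assoc, List.foldl_cons]
          have : greedyB x rs [x] = rs.foldl growOne [x] := by
            simpa using greedyB_eq_foldl rs x []
          simp [this, Function.comp]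

lemma seqs_eq_chains (s : List (Int × Int)) : s.foldl stepA [] = chainsB s := by
  simpa using foldl_stepA_eq s []

-- ===== VERDICT (by name: the statement is the Claim_ definition above) =====
theorem get_circus_tower_spec : Claim_equal_get_circus_tower := by
  intro arr _ _
  unfold Spec_get_circus_tower get_circus_tower get_circus_tower_alt
  rw [seqs_eq_chains]
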